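-- pv_equiv track=rewrite | github.com/QT-cheng/-roughSet | Reduction.py | decision_preservation_incomplete_discernibility_matrix
-- ===== SOURCE A (Python) =====
-- def incomplete_discernibility_matrix(u, C):
--     R = []
--     for i in u:
--         u0 = []
--         for j in u:
--             u0.append(set())
--         R.append(u0)
--     lc = []
--     for i in range(1, len(u[0])):
--         if u[0][i] in C:
--             lc.append(i)
--     for j in range(1, len(u)):
--         for i in range(j + 1, len(u)):
--             for k in lc:
--                 if (u[i][k] != u[j][k]) and (u[i][k]) and (u[j][k]):
--                     R[i][j].add(u[0][k])
--     return R
--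
-- def decision_preservation_incomplete_discernibility_matrix(u, C, D):
--     R = incomplete_discernibility_matrix(u, C)
--     ld = []
--     for i in range(1, len(u[0])):
--         if u[0][i] in D:
--             ld.append(i)
--     for j in range(1, len(R)):
--         for i in range(j + 1, len(R)):
--             if ee_incomplete(u, i, C, D) == ee_incomplete(u, j, C, D):
--                 R[i][j].clear()
--     return R
--
-- def t_incomplete(u, x, C):
--     lc = []
--     for i in range(1, len(u[0])):
--         if u[0][i] in C:
--             lc.append(i)
--     R = set()
--     for i in range(1, len(u)):
--         e = 1
--         for j in lc:
--             if not ((u[x][j] == u[i][j]) or (not u[x][j]) or (not u[i][j])):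
--                 e = 0
--         if e == 1:
--             R.add(i)
--     return R
--
-- def ee_incomplete(u, x, C, D):
--     t = t_incomplete(u, x, C)
--     ld = []
--     for i in range(1, len(u[0])):
--         if u[0][i] in D:
--             ld.append(i)
--     R = set()
--     for i in t:
--         r = ''
--         for j in ld:
--             r += str(u[i][j]) + ';'
--         R.add(r)
--     return R
-- ===== SOURCE B (Python) =====
-- def decision_preservation_incomplete_discernibility_matrix(u, C, D):
--     # B: compute each row's decision-equivalence key once, assign group ids via a
--     # dict, and build the matrix directly (empty cell when same group) instead of
--     # building the full discernibility matrix and clearing pairs with O(n^2)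
--     # recomputed ee-comparisons.
--     n = len(u)
--     header = u[0]
--     lc = [k for k in range(1, len(header)) if header[k] in C]
--     ld = [k for k in range(1, len(header)) if header[k] in D]
--
--     def ee_key(x):
--         strs = set()
--         for i in range(1, n):
--             if all(u[x][j] == u[i][j] or not u[x][j] or not u[i][j] for j in lc):
--                 strs.add(''.join(str(u[i][j]) + ';' for j in ld))
--         return frozenset(strs)
--
--     groups = {}
--     gid = [0] * n
--     for x in range(1, n):
--         gid[x] = groups.setdefault(ee_key(x), len(groups))
--
--     R = []
--     for i in range(n):
--         row = []
--         for j in range(n):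
--             cell = set()
--             if 1 <= j < i and gid[i] != gid[j]:
--                 for k in lc:
--                     if u[i][k] != u[j][k] and u[i][k] and u[j][k]:
--                         cell.add(header[k])
--             row.append(cell)
--         R.append(row)
--     return R
-- ===== Notes on version B (the rewrite author's own statement) =====
-- stated objective: faster
-- what changed: B computes each row's decision-equivalence key (ee_incomplete) once, assigns group ids via a dict keyed by frozensets, and builds the matrix directly (empty cell for same-group pairs) instead of building the full discernibility matrix and then clearing pairs while recomputing ee_incomplete for both rows of every pair.
import Mathlib
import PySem

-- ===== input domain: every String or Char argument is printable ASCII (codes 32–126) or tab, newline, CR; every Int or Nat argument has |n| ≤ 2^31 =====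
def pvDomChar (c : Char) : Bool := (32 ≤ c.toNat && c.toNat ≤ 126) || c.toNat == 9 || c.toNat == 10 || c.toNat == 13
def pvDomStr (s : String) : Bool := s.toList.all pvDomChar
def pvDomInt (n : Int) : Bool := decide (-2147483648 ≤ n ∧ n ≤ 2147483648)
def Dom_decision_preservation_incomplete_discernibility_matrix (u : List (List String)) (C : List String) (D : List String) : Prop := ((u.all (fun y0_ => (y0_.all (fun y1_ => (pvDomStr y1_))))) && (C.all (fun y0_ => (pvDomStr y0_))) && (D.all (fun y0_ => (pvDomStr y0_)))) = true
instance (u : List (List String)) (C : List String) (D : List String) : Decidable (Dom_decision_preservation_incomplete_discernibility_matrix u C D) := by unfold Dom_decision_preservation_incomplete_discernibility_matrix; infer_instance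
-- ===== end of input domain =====

-- B replaces A's "build full matrix, then clear pairs while recomputing ee_incomplete for
-- both rows of every pair" by "compute each row's ee-key once, assign group ids via a
-- first-set-equal lookup (a dict keyed by frozensets), and build the matrix directly":
-- objective faster (O(n^2·m) key computations instead of O(n^3·m)).

-- ===== PORT A =====
-- the 'for i in range(1, len(u[0])): if u[0][i] in S: l.append(i)' loop, inlined in each
-- Python function; out-of-range u[i][k] is read with default "" (Python raises there; Pre_ excludes it)
def pvColsA (u : List (List String)) (S : List String) : List Nat :=
  (List.range' 1 ((u.getD 0 []).length - 1)).foldl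
    (fun acc i => if (u.getD 0 []).getD i "" ∈ S then acc ++ [i] else acc) []

def pv_incomplete_discernibility_matrix (u : List (List String)) (C : List String) :
    List (List (PySem.Set String)) :=
  let R := u.foldl (fun R _i => R ++ [u.foldl (fun u0 _j => u0 ++ [(PySem.Set.empty : PySem.Set String)]) []]) []
  let lc := pvColsA u C
  (List.range' 1 (u.length - 1)).foldl (fun R j =>
    (List.range' (j + 1) (u.length - (j + 1))).foldl (fun R i =>
      lc.foldl (fun R k =>
        if (u.getD i []).getD k "" ≠ (u.getD j []).getD k "" ∧
            (u.getD i []).getD k "" ≠ "" ∧ (u.getD j []).getD k "" ≠ "" then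
          R.modify i (fun row => row.modify j (fun c => PySem.Set.add c ((u.getD 0 []).getD k "")))
        else R) R) R) R

def pv_t_incomplete (u : List (List String)) (x : Nat) (C : List String) : PySem.Set Nat :=
  let lc := pvColsA u C
  (List.range' 1 (u.length - 1)).foldl (fun R i =>
    let e := lc.foldl (fun e j =>
      if ¬ ((u.getD x []).getD j "" = (u.getD i []).getD j "" ∨
            (u.getD x []).getD j "" = "" ∨ (u.getD i []).getD j "" = "") then 0 else e) (1 : Nat)
    if e = 1 then PySem.Set.add R i else R) PySem.Set.empty

-- 'for i in t' iterates a Python set; the resulting set of strings is only ever compared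
-- with Set.equal (order-insensitive), so iterating t in list order is exact
def pv_ee_incomplete (u : List (List String)) (x : Nat) (C : List String) (D : List String) :
    PySem.Set String :=
  let t := pv_t_incomplete u x C
  let ld := pvColsA u D
  t.foldl (fun R i =>
    PySem.Set.add R (ld.foldl (fun r j => r ++ (u.getD i []).getD j "" ++ ";") "")) PySem.Set.empty

def decision_preservation_incomplete_discernibility_matrix (u : List (List String)) (C : List String) (D : List String) : List (List (List String)) :=
  let R := pv_incomplete_discernibility_matrix u C
  let _ld := pvColsA u D
  (List.range' 1 (R.length - 1)).foldl (fun R2 j =>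
    (List.range' (j + 1) (R.length - (j + 1))).foldl (fun R2 i =>
      if PySem.Set.equal (pv_ee_incomplete u i C D) (pv_ee_incomplete u j C D) then
        R2.modify i (fun row => row.modify j (fun _ => (PySem.Set.empty : PySem.Set String)))
      else R2) R2) R

-- ===== PORT B =====
def pvColsB (header : List String) (S : List String) : List Nat :=
  (List.range' 1 (header.length - 1)).filter (fun k => decide (header.getD k "" ∈ S))

def pv_ee_key (u : List (List String)) (lc : List Nat) (ld : List Nat) (x : Nat) :
    PySem.Set String :=
  (List.range' 1 (u.length - 1)).foldl (fun strs i =>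
    if lc.all (fun j => decide ((u.getD x []).getD j "" = (u.getD i []).getD j "" ∨
        (u.getD x []).getD j "" = "" ∨ (u.getD i []).getD j "" = "")) then
      PySem.Set.add strs (String.join (ld.map (fun j => (u.getD i []).getD j "" ++ ";")))
    else strs) PySem.Set.empty

-- first index of a set-equal key: hand port of the frozenset-keyed dict lookup
-- (PySem.Dict's BEq on List String is list equality, not set equality)
def pvFindEq (gs : List (PySem.Set String)) (k : PySem.Set String) : Option Nat :=
  match gs with
  | [] => none
  | g :: rest => if PySem.Set.equal g k then some 0 else (pvFindEq rest k).map (· + 1)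

-- groups.setdefault(key, len(groups)) over the list of keys; returns (groups, gid list)
def pv_groups_gid (keys : List (PySem.Set String)) : List (PySem.Set String) × List Nat :=
  keys.foldl (fun st k =>
    match pvFindEq st.1 k with
    | some ix => (st.1, st.2 ++ [ix])
    | none => (st.1 ++ [k], st.2 ++ [st.1.length])) ([], [])

def decision_preservation_incomplete_discernibility_matrix_alt (u : List (List String)) (C : List String) (D : List String) : List (List (List String)) :=
  let n := u.length
  let header := u.getD 0 []
  let lc := pvColsB header C
  let ld := pvColsB header D
  let gidL := (pv_groups_gid ((List.range' 1 (n - 1)).map (pv_ee_key u lc ld))).2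
  let gid := fun (x : Nat) => gidL.getD (x - 1) 0
  (List.range n).map (fun i => (List.range n).map (fun j =>
    if 1 ≤ j ∧ j < i ∧ gid i ≠ gid j then
      lc.foldl (fun cell k =>
        if (u.getD i []).getD k "" ≠ (u.getD j []).getD k "" ∧
            (u.getD i []).getD k "" ≠ "" ∧ (u.getD j []).getD k "" ≠ "" then
          PySem.Set.add cell (header.getD k "")
        else cell) (PySem.Set.empty : PySem.Set String)
    else (PySem.Set.empty : PySem.Set String)))

-- ===== PRECONDITION & SPEC =====
-- Pre_ excludes empty u (A raises IndexError on u[0]) and ragged tables where a C/D column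
-- index falls outside some non-header row: A raises IndexError there too, except in the
-- degenerate case of at most 2 rows, where A's pair loops never run and it returns the
-- all-empty matrix while B still computes the equivalence keys and raises.
def Pre_decision_preservation_incomplete_discernibility_matrix (u : List (List String)) (C : List String) (D : List String) : Prop :=
  u ≠ [] ∧ ∀ r ∈ u.tail, ∀ k ∈ List.range' 1 ((u.getD 0 []).length - 1),
    ((u.getD 0 []).getD k "" ∈ C ∨ (u.getD 0 []).getD k "" ∈ D) → k < r.length
instance (u : List (List String)) (C : List String) (D : List String) : Decidable (Pre_decision_preservation_incomplete_discernibility_matrix u C D) := by unfold Pre_decision_preservation_incomplete_discernibility_matrix; infer_instance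

def pvWitness_decision_preservation_incomplete_discernibility_matrix : List (List String) × List String × List String :=
  ([["h", "a"], ["x", "1"], ["y", "2"]], ["a"], ["a"])

def Spec_decision_preservation_incomplete_discernibility_matrix (u : List (List String)) (C : List String) (D : List String) (out : List (List (List String))) : Prop := out = decision_preservation_incomplete_discernibility_matrix_alt u C D
instance (u : List (List String)) (C : List String) (D : List String) (out : List (List (List String))) : Decidable (Spec_decision_preservation_incomplete_discernibility_matrix u C D out) := by unfold Spec_decision_preservation_incomplete_discernibility_matrix; infer_instance

-- ===== CLAIM (what is proved, stated in full; the proofs are below) =====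
def Claim_equal_decision_preservation_incomplete_discernibility_matrix : Prop := ∀ (u : List (List String)) (C : List String) (D : List String), Dom_decision_preservation_incomplete_discernibility_matrix u C D → Pre_decision_preservation_incomplete_discernibility_matrix u C D → Spec_decision_preservation_incomplete_discernibility_matrix u C D (decision_preservation_incomplete_discernibility_matrix u C D)


-- ===== LEMMAS AND PROOFS =====

-- spec-level abbreviations (proof-only)
def pvEqv (s t : PySem.Set String) : Prop := ∀ x, x ∈ s ↔ x ∈ t

def pvOk (u : List (List String)) (lc : List Nat) (x i : Nat) : Bool :=
  lc.all (fun j => decide ((u.getD x []).getD j "" = (u.getD i []).getD j "" ∨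
      (u.getD x []).getD j "" = "" ∨ (u.getD i []).getD j "" = ""))

def pvCellF (u : List (List String)) (C : List String) (i j : Nat) (c0 : PySem.Set String) :
    PySem.Set String :=
  (pvColsB (u.getD 0 []) C).foldl (fun cell k =>
    if (u.getD i []).getD k "" ≠ (u.getD j []).getD k "" ∧
        (u.getD i []).getD k "" ≠ "" ∧ (u.getD j []).getD k "" ≠ "" then
      PySem.Set.add cell ((u.getD 0 []).getD k "") else cell) c0

def pvF1 (u : List (List String)) (C : List String) (p : Nat × Nat) :
    PySem.Set String → PySem.Set String :=
  fun c => pvCellF u C p.2 p.1 c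

def pvF2 (u : List (List String)) (C D : List String) (p : Nat × Nat) :
    PySem.Set String → PySem.Set String :=
  fun c => if PySem.Set.equal (pv_ee_incomplete u p.2 C D) (pv_ee_incomplete u p.1 C D) then [] else c

def pvUpd (R : List (List (PySem.Set String))) (i j : Nat)
    (f : PySem.Set String → PySem.Set String) : List (List (PySem.Set String)) :=
  R.modify i (fun row => row.modify j f)

def pvCellAt (R : List (List (PySem.Set String))) (i j : Nat) : PySem.Set String :=
  (R.getD i []).getD j []

def pvPairs (n : Nat) : List (Nat × Nat) :=
  (List.range' 1 (n - 1)).flatMap (fun j => (List.range' (j + 1) (n - (j + 1))).map (fun i => (j, i)))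

theorem pvColsA_eq (u : List (List String)) (S : List String) :
    pvColsA u S = pvColsB (u.getD 0 []) S := by
  unfold pvColsA pvColsB
  have h : (fun (acc : List Nat) (i : Nat) => if (u.getD 0 []).getD i "" ∈ S then acc ++ [i] else acc)
      = fun (acc : List Nat) (i : Nat) =>
          if (fun i : Nat => decide ((u.getD 0 []).getD i "" ∈ S)) i = true then acc ++ [id i] else acc := by
    funext acc i; simp
  rw [h, PySem.List.foldl_append_if]
  simp

theorem pv_eflag (l : List Nat) (P : Nat → Prop) [DecidablePred P] (e0 : Nat) :
    l.foldl (fun e j => if ¬ P j then 0 else e) e0 =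
      if l.all (fun j => decide (P j)) then e0 else 0 := by
  induction l generalizing e0 with
  | nil => simp
  | cons x xs ih =>
    simp only [List.foldl_cons, List.all_cons]
    by_cases hx : P x
    · rw [if_neg (not_not_intro hx), ih e0]
      simp [hx]
    · rw [if_pos hx, ih 0]
      simp [hx]

theorem pv_t_eq (u : List (List String)) (x : Nat) (C : List String) :
    pv_t_incomplete u x C =
      (List.range' 1 (u.length - 1)).filter (pvOk u (pvColsB (u.getD 0 []) C) x) := by
  unfold pv_t_incomplete
  rw [pvColsA_eq]
  simp only [pv_eflag]
  have hbody : ∀ (R : PySem.Set Nat) (i : Nat),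
      (if (if (pvColsB (u.getD 0 []) C).all (fun j => decide ((u.getD x []).getD j "" = (u.getD i []).getD j "" ∨
          (u.getD x []).getD j "" = "" ∨ (u.getD i []).getD j "" = "")) then (1 : Nat) else 0) = 1 then
        PySem.Set.add R i else R) =
      if pvOk u (pvColsB (u.getD 0 []) C) x i then PySem.Set.add R i else R := by
    intro R i
    unfold pvOk
    split <;> simp_all
  simp only [hbody]
  calc (List.range' 1 (u.length - 1)).foldl
        (fun R i => if pvOk u (pvColsB (u.getD 0 []) C) x i then PySem.Set.add R i else R) PySem.Set.empty
      = ((List.range' 1 (u.length - 1)).filter (pvOk u (pvColsB (u.getD 0 []) C) x)).foldl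
          PySem.Set.add PySem.Set.empty := by rw [List.foldl_filter]
    _ = PySem.Set.ofList ((List.range' 1 (u.length - 1)).filter (pvOk u (pvColsB (u.getD 0 []) C) x)) :=
        (PySem.Set.ofList_eq_foldl _).symm
    _ = _ := PySem.Set.ofList_eq_self_of_nodup _ ((List.nodup_range' _).filter _)

theorem pv_ee_eq_key (u : List (List String)) (x : Nat) (C D : List String) :
    pv_ee_incomplete u x C D =
      pv_ee_key u (pvColsB (u.getD 0 []) C) (pvColsB (u.getD 0 []) D) x := by
  unfold pv_ee_incomplete pv_ee_key
  rw [pv_t_eq, pvColsA_eq, List.foldl_filter]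
  have hfn : (fun (R : PySem.Set String) (i : Nat) =>
      if pvOk u (pvColsB (u.getD 0 []) C) x i then
        PySem.Set.add R ((pvColsB (u.getD 0 []) D).foldl (fun r j => r ++ (u.getD i []).getD j "" ++ ";") "")
      else R)
      = fun (R : PySem.Set String) (i : Nat) =>
        if (pvColsB (u.getD 0 []) C).all (fun j => decide ((u.getD x []).getD j "" = (u.getD i []).getD j "" ∨
            (u.getD x []).getD j "" = "" ∨ (u.getD i []).getD j "" = "")) then
          PySem.Set.add R (String.join ((pvColsB (u.getD 0 []) D).map (fun j => (u.getD i []).getD j "" ++ ";")))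
        else R := by
    funext R i
    have hs : String.join ((pvColsB (u.getD 0 []) D).map (fun j => (u.getD i []).getD j "" ++ ";"))
        = (pvColsB (u.getD 0 []) D).foldl (fun r j => r ++ (u.getD i []).getD j "" ++ ";") "" := by
      show ((pvColsB (u.getD 0 []) D).map (fun j => (u.getD i []).getD j "" ++ ";")).foldl (· ++ ·) "" = _
      rw [List.foldl_map]
      have : (fun (r : String) (j : Nat) => r ++ ((u.getD i []).getD j "" ++ ";"))
          = fun (r : String) (j : Nat) => r ++ (u.getD i []).getD j "" ++ ";" := by
        funext r j; rw [String.append_assoc]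
      rw [this]
    rw [hs]
    rfl
  rw [hfn]

theorem pv_modify_modify {α : Type} (l : List α) (i : Nat) (f g : α → α) :
    (l.modify i f).modify i g = l.modify i (fun x => g (f x)) := by
  apply List.ext_getElem?
  intro n
  simp only [List.getElem?_modify]
  by_cases hin : i = n <;> simp [hin, Function.comp_def]

theorem pv_getD_modify_ne {α : Type} (l : List α) (i a : Nat) (h : i ≠ a) (f : α → α) (d : α) :
    (l.modify i f).getD a d = l.getD a d := by
  rw [List.getD_eq_getElem?_getD, List.getD_eq_getElem?_getD, List.getElem?_modify]
  cases l[a]? with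
  | none => rfl
  | some v => simp [h]

theorem pv_getD_modify_self {α : Type} (l : List α) (i : Nat) (h : i < l.length) (f : α → α) (d : α) :
    (l.modify i f).getD i d = f (l.getD i d) := by
  rw [List.getD_eq_getElem?_getD, List.getD_eq_getElem?_getD, List.getElem?_modify]
  rw [List.getElem?_eq_getElem h]
  simp

theorem pv_cellAt_upd_ne (R : List (List (PySem.Set String))) (a b i j : Nat)
    (h : a ≠ i ∨ b ≠ j) (f : PySem.Set String → PySem.Set String) :
    pvCellAt (pvUpd R a b f) i j = pvCellAt R i j := by
  unfold pvCellAt pvUpd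
  by_cases ha : i = a
  · subst ha
    have hb : b ≠ j := h.resolve_left (by simp)
    by_cases hi : i < R.length
    · rw [pv_getD_modify_self _ _ hi]
      exact pv_getD_modify_ne _ _ _ hb _ _
    · have h1 : (R.modify i fun row => row.modify b f).getD i [] = [] :=
        List.getD_eq_default _ _ (by simpa [List.length_modify] using Nat.le_of_not_lt hi)
      have h2 : R.getD i [] = [] := List.getD_eq_default _ _ (Nat.le_of_not_lt hi)
      rw [h1, h2]
  · rw [pv_getD_modify_ne _ _ _ (Ne.symm ha)]

theorem pv_cellAt_upd_self (R : List (List (PySem.Set String))) (i j : Nat)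
    (hi : i < R.length) (hj : j < (R.getD i []).length) (f : PySem.Set String → PySem.Set String) :
    pvCellAt (pvUpd R i j f) i j = f (pvCellAt R i j) := by
  unfold pvCellAt pvUpd
  rw [pv_getD_modify_self _ _ hi, pv_getD_modify_self _ _ hj]

theorem pv_upd_length (R : List (List (PySem.Set String))) (a b : Nat) (f : PySem.Set String → PySem.Set String) :
    (pvUpd R a b f).length = R.length := by
  simp [pvUpd]

theorem pv_upd_rowlen (R : List (List (PySem.Set String))) (a b i : Nat) (f : PySem.Set String → PySem.Set String) :
    ((pvUpd R a b f).getD i []).length = (R.getD i []).length := by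
  unfold pvUpd
  by_cases ha : a = i
  · rw [ha]
    by_cases hi : i < R.length
    · rw [pv_getD_modify_self _ _ hi]; simp
    · have h1 : (R.modify i fun row => row.modify b f).getD i [] = [] :=
        List.getD_eq_default _ _ (by simpa [List.length_modify] using Nat.le_of_not_lt hi)
      have h2 : R.getD i [] = [] := List.getD_eq_default _ _ (Nat.le_of_not_lt hi)
      rw [h1, h2]
  · rw [pv_getD_modify_ne _ _ _ ha]

theorem pv_upd_id (R : List (List (PySem.Set String))) (i j : Nat) :
    pvUpd R i j (fun c => c) = R := by
  unfold pvUpd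
  have h : (fun (row : List (PySem.Set String)) => row.modify j (fun c => c)) = fun row => row := by
    funext row; exact List.modify_id j row
  rw [h]
  exact List.modify_id i R

theorem pv_upd_upd (R : List (List (PySem.Set String))) (i j : Nat)
    (f g : PySem.Set String → PySem.Set String) :
    pvUpd (pvUpd R i j f) i j g = pvUpd R i j (fun c => g (f c)) := by
  unfold pvUpd
  rw [pv_modify_modify]
  congr 1
  funext row
  exact pv_modify_modify row j f g

theorem pv_inner_fold_upd (l : List Nat) (g : PySem.Set String → Nat → PySem.Set String)
    (i j : Nat) : ∀ (R : List (List (PySem.Set String))),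
    l.foldl (fun R k => pvUpd R i j (fun c => g c k)) R = pvUpd R i j (fun c => l.foldl g c) := by
  induction l with
  | nil => intro R; simpa using (pv_upd_id R i j).symm
  | cons k ks ih =>
    intro R
    simp only [List.foldl_cons]
    rw [ih, pv_upd_upd]

theorem pv_foldl_upd_length (F : Nat × Nat → PySem.Set String → PySem.Set String)
    (L : List (Nat × Nat)) : ∀ (R : List (List (PySem.Set String))),
    (L.foldl (fun R p => pvUpd R p.2 p.1 (F p)) R).length = R.length := by
  induction L with
  | nil => intro R; rfl
  | cons p ps ih =>
    intro R
    simp only [List.foldl_cons]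
    rw [ih, pv_upd_length]

theorem pv_foldl_upd_rowlen (F : Nat × Nat → PySem.Set String → PySem.Set String)
    (L : List (Nat × Nat)) : ∀ (R : List (List (PySem.Set String))) (i : Nat),
    ((L.foldl (fun R p => pvUpd R p.2 p.1 (F p)) R).getD i []).length = (R.getD i []).length := by
  induction L with
  | nil => intro R i; rfl
  | cons p ps ih =>
    intro R i
    simp only [List.foldl_cons]
    rw [ih, pv_upd_rowlen]

theorem pv_foldl_upd_cellAt (F : Nat × Nat → PySem.Set String → PySem.Set String) :
    ∀ (L : List (Nat × Nat)) (R : List (List (PySem.Set String))), L.Nodup →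
      (∀ p ∈ L, p.2 < R.length ∧ p.1 < (R.getD p.2 []).length) →
      ∀ i j, pvCellAt (L.foldl (fun R p => pvUpd R p.2 p.1 (F p)) R) i j =
        if (j, i) ∈ L then F (j, i) (pvCellAt R i j) else pvCellAt R i j := by
  intro L
  induction L with
  | nil => intro R _ _ i j; simp
  | cons p ps ih =>
    intro R hnd hrange i j
    simp only [List.foldl_cons]
    have hnd' : ps.Nodup := hnd.of_cons
    have hrange' : ∀ q ∈ ps, q.2 < (pvUpd R p.2 p.1 (F p)).length ∧
        q.1 < ((pvUpd R p.2 p.1 (F p)).getD q.2 []).length := by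
      intro q hq
      rw [pv_upd_length, pv_upd_rowlen]
      exact hrange q (List.mem_cons_of_mem _ hq)
    rw [ih _ hnd' hrange' i j]
    by_cases hmem : (j, i) ∈ ps
    · have hne : p ≠ (j, i) := by
        intro hEq; exact (List.nodup_cons.mp hnd).1 (hEq ▸ hmem)
      have : pvCellAt (pvUpd R p.2 p.1 (F p)) i j = pvCellAt R i j := by
        apply pv_cellAt_upd_ne
        by_cases h2 : p.2 = i
        · right; intro h1; exact hne (Prod.ext h1 h2)
        · left; exact h2
      rw [this]
      simp [hmem]
    · by_cases hp : p = (j, i)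
      · subst hp
        have hr := hrange (j, i) List.mem_cons_self
        rw [pv_cellAt_upd_self R i j hr.1 hr.2]
        simp [hmem]
      · have hne2 : p.2 ≠ i ∨ p.1 ≠ j := by
          by_cases h2 : p.2 = i
          · right; intro h1; exact hp (Prod.ext h1 h2)
          · left; exact h2
        rw [pv_cellAt_upd_ne _ _ _ _ _ hne2]
        have hout : (j, i) ∉ p :: ps := by
          intro hmem2
          rcases List.mem_cons.mp hmem2 with h | h
          · exact hp h.symm
          · exact hmem h
        rw [if_neg hmem, if_neg hout]

theorem pv_mem_pairs (n : Nat) (p : Nat × Nat) :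
    p ∈ pvPairs n ↔ 1 ≤ p.1 ∧ p.1 < p.2 ∧ p.2 < n := by
  unfold pvPairs
  simp only [List.mem_flatMap, List.mem_map, List.mem_range'_1]
  constructor
  · rintro ⟨j, ⟨hj1, hj2⟩, i, ⟨hi1, hi2⟩, rfl⟩
    exact ⟨hj1, by omega, by omega⟩
  · rintro ⟨h1, h2, h3⟩
    exact ⟨p.1, ⟨h1, by omega⟩, p.2, ⟨by omega, by omega⟩, rfl⟩

theorem pv_nodup_pairs (n : Nat) : (pvPairs n).Nodup := by
  unfold pvPairs
  rw [List.nodup_flatMap]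
  constructor
  · intro j _
    refine List.Nodup.map ?_ (List.nodup_range' _)
    intro a b h
    exact congrArg Prod.snd h
  · refine List.Pairwise.imp ?_ (List.nodup_range' (step := 1) (by norm_num))
    intro a b hab x hx1 hx2
    obtain ⟨i1, _, rfl⟩ := List.mem_map.mp hx1
    obtain ⟨i2, _, h2⟩ := List.mem_map.mp hx2
    exact hab ((Prod.mk.injEq _ _ _ _).mp h2).1.symm

theorem pv_double_fold (n : Nat) (step : List (List (PySem.Set String)) → Nat → Nat → List (List (PySem.Set String)))
    (R : List (List (PySem.Set String))) :
    (List.range' 1 (n - 1)).foldl (fun R j =>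
        (List.range' (j + 1) (n - (j + 1))).foldl (fun R i => step R j i) R) R =
      (pvPairs n).foldl (fun R p => step R p.1 p.2) R := by
  conv_rhs => rw [pvPairs, List.foldl_flatMap]
  simp only [List.foldl_map]

-- the all-empty initial matrix
theorem pv_mat0 (u : List (List String)) :
    u.foldl (fun R _i => R ++ [u.foldl (fun u0 _j => u0 ++ [(PySem.Set.empty : PySem.Set String)]) []]) [] =
      u.map (fun _ => u.map (fun _ => ([] : PySem.Set String))) := by
  rw [PySem.List.foldl_append_singleton_eq_map]
  simp only [PySem.List.foldl_append_singleton_eq_map, List.nil_append]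
  rfl

theorem pv_cellAt_M0 (u : List (List String)) (i j : Nat) :
    pvCellAt (u.map (fun _ => u.map (fun _ => ([] : PySem.Set String)))) i j = [] := by
  unfold pvCellAt
  by_cases hi : i < u.length
  · rw [List.getD_eq_getElem _ _ (show i < (u.map (fun _ => u.map (fun _ => ([] : PySem.Set String)))).length from by
      rw [List.length_map]; exact hi), List.getElem_map]
    by_cases hj : j < u.length
    · rw [List.getD_eq_getElem _ _ (show j < (u.map (fun _ => ([] : PySem.Set String))).length from by
        rw [List.length_map]; exact hj), List.getElem_map]
    · exact List.getD_eq_default _ _ (by rw [List.length_map]; exact Nat.le_of_not_lt hj)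
  · rw [List.getD_eq_default _ _ (show (u.map (fun _ => u.map (fun _ => ([] : PySem.Set String)))).length ≤ i from by
      rw [List.length_map]; exact Nat.le_of_not_lt hi)]
    simp

theorem pv_A1_eq (u : List (List String)) (C : List String) :
    pv_incomplete_discernibility_matrix u C =
      (pvPairs u.length).foldl (fun R p => pvUpd R p.2 p.1 (pvF1 u C p))
        (u.map (fun _ => u.map (fun _ => ([] : PySem.Set String)))) := by
  unfold pv_incomplete_discernibility_matrix
  rw [pv_mat0, pvColsA_eq]
  have hd := pv_double_fold u.length (fun R j i =>
    (pvColsB (u.getD 0 []) C).foldl (fun R k =>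
      if (u.getD i []).getD k "" ≠ (u.getD j []).getD k "" ∧
          (u.getD i []).getD k "" ≠ "" ∧ (u.getD j []).getD k "" ≠ "" then
        R.modify i (fun row => row.modify j (fun c => PySem.Set.add c ((u.getD 0 []).getD k "")))
      else R) R)
    (u.map (fun _ => u.map (fun _ => ([] : PySem.Set String))))
  rw [hd]
  have hstep : (fun (R : List (List (PySem.Set String))) (p : Nat × Nat) =>
      (pvColsB (u.getD 0 []) C).foldl (fun R k =>
        if (u.getD p.2 []).getD k "" ≠ (u.getD p.1 []).getD k "" ∧
            (u.getD p.2 []).getD k "" ≠ "" ∧ (u.getD p.1 []).getD k "" ≠ "" then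
          R.modify p.2 (fun row => row.modify p.1 (fun c => PySem.Set.add c ((u.getD 0 []).getD k "")))
        else R) R)
      = fun R p => pvUpd R p.2 p.1 (pvF1 u C p) := by
    funext R p
    have hb : (fun (R : List (List (PySem.Set String))) (k : Nat) =>
        if (u.getD p.2 []).getD k "" ≠ (u.getD p.1 []).getD k "" ∧
            (u.getD p.2 []).getD k "" ≠ "" ∧ (u.getD p.1 []).getD k "" ≠ "" then
          R.modify p.2 (fun row => row.modify p.1 (fun c => PySem.Set.add c ((u.getD 0 []).getD k "")))
        else R)
        = fun R k => pvUpd R p.2 p.1 (fun c =>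
            if (u.getD p.2 []).getD k "" ≠ (u.getD p.1 []).getD k "" ∧
                (u.getD p.2 []).getD k "" ≠ "" ∧ (u.getD p.1 []).getD k "" ≠ "" then
              PySem.Set.add c ((u.getD 0 []).getD k "") else c) := by
      funext R k
      by_cases hc : (u.getD p.2 []).getD k "" ≠ (u.getD p.1 []).getD k "" ∧
          (u.getD p.2 []).getD k "" ≠ "" ∧ (u.getD p.1 []).getD k "" ≠ ""
      · simp only [if_pos hc]
        rfl
      · simp only [if_neg hc]
        exact (pv_upd_id R p.2 p.1).symm
    rw [hb, pv_inner_fold_upd]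
    rfl
  rw [hstep]

theorem pv_A1_length (u : List (List String)) (C : List String) :
    (pv_incomplete_discernibility_matrix u C).length = u.length := by
  rw [pv_A1_eq, pv_foldl_upd_length]
  simp

theorem pv_A1_rowlen (u : List (List String)) (C : List String) (i : Nat) (hi : i < u.length) :
    ((pv_incomplete_discernibility_matrix u C).getD i []).length = u.length := by
  rw [pv_A1_eq, pv_foldl_upd_rowlen]
  rw [List.getD_eq_getElem _ _ (by simpa using hi), List.getElem_map]
  simp

theorem pv_A1_cellAt (u : List (List String)) (C : List String) (i j : Nat) :
    pvCellAt (pv_incomplete_discernibility_matrix u C) i j =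
      if (j, i) ∈ pvPairs u.length then pvCellF u C i j [] else [] := by
  rw [pv_A1_eq]
  have hR : ∀ p ∈ pvPairs u.length,
      p.2 < (u.map (fun _ => u.map (fun _ => ([] : PySem.Set String)))).length ∧
      p.1 < ((u.map (fun _ => u.map (fun _ => ([] : PySem.Set String)))).getD p.2 []).length := by
    intro p hp
    obtain ⟨h1, h2, h3⟩ := (pv_mem_pairs _ _).mp hp
    refine ⟨by rw [List.length_map]; exact h3, ?_⟩
    rw [List.getD_eq_getElem _ _ (show p.2 < (u.map (fun _ => u.map (fun _ => ([] : PySem.Set String)))).length from by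
      rw [List.length_map]; exact h3), List.getElem_map, List.length_map]
    omega
  rw [pv_foldl_upd_cellAt _ _ _ (pv_nodup_pairs _) hR i j]
  rw [pv_cellAt_M0]
  rfl

theorem pv_A2_eq (u : List (List String)) (C D : List String) :
    decision_preservation_incomplete_discernibility_matrix u C D =
      (pvPairs u.length).foldl (fun R p =>
        pvUpd R p.2 p.1 (pvF2 u C D p))
        (pv_incomplete_discernibility_matrix u C) := by
  show (List.range' 1 ((pv_incomplete_discernibility_matrix u C).length - 1)).foldl
      (fun R2 j => (List.range' (j + 1) ((pv_incomplete_discernibility_matrix u C).length - (j + 1))).foldl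
        (fun R2 i =>
          if PySem.Set.equal (pv_ee_incomplete u i C D) (pv_ee_incomplete u j C D) then
            R2.modify i (fun row => row.modify j (fun _ => (PySem.Set.empty : PySem.Set String)))
          else R2) R2)
      (pv_incomplete_discernibility_matrix u C) = _
  rw [pv_A1_length]
  have hd := pv_double_fold u.length (fun R2 j i =>
    if PySem.Set.equal (pv_ee_incomplete u i C D) (pv_ee_incomplete u j C D) then
      R2.modify i (fun row => row.modify j (fun _ => (PySem.Set.empty : PySem.Set String)))
    else R2) (pv_incomplete_discernibility_matrix u C)
  rw [hd]
  have hstep : (fun (R2 : List (List (PySem.Set String))) (p : Nat × Nat) =>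
      if PySem.Set.equal (pv_ee_incomplete u p.2 C D) (pv_ee_incomplete u p.1 C D) then
        R2.modify p.2 (fun row => row.modify p.1 (fun _ => (PySem.Set.empty : PySem.Set String)))
      else R2)
      = fun R2 p => pvUpd R2 p.2 p.1 (pvF2 u C D p) := by
    funext R2 p
    by_cases hc : PySem.Set.equal (pv_ee_incomplete u p.2 C D) (pv_ee_incomplete u p.1 C D)
    · rw [if_pos hc]
      unfold pvUpd pvF2
      congr 1
      funext row
      congr 1
      funext c
      rw [if_pos hc]
      rfl
    · rw [if_neg hc]
      have hid : pvF2 u C D p = fun c => c := by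
        funext c
        simp [pvF2, hc]
      rw [hid]
      exact (pv_upd_id R2 p.2 p.1).symm
  rw [hstep]

theorem pv_A2_cellAt (u : List (List String)) (C D : List String) (i j : Nat) :
    pvCellAt (decision_preservation_incomplete_discernibility_matrix u C D) i j =
      if (j, i) ∈ pvPairs u.length then
        (if PySem.Set.equal (pv_ee_incomplete u i C D) (pv_ee_incomplete u j C D) then []
         else pvCellF u C i j [])
      else [] := by
  rw [pv_A2_eq]
  have hR : ∀ p ∈ pvPairs u.length,
      p.2 < (pv_incomplete_discernibility_matrix u C).length ∧
      p.1 < ((pv_incomplete_discernibility_matrix u C).getD p.2 []).length := by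
    intro p hp
    obtain ⟨h1, h2, h3⟩ := (pv_mem_pairs _ _).mp hp
    refine ⟨by rw [pv_A1_length]; exact h3, ?_⟩
    rw [pv_A1_rowlen u C _ h3]
    omega
  rw [pv_foldl_upd_cellAt _ _ _ (pv_nodup_pairs _) hR i j]
  rw [pv_A1_cellAt]
  by_cases hm : (j, i) ∈ pvPairs u.length <;> simp [hm, pvF2]

theorem pv_A2_length (u : List (List String)) (C D : List String) :
    (decision_preservation_incomplete_discernibility_matrix u C D).length = u.length := by
  rw [pv_A2_eq, pv_foldl_upd_length, pv_A1_length]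

theorem pv_A2_rowlen (u : List (List String)) (C D : List String) (i : Nat) (hi : i < u.length) :
    ((decision_preservation_incomplete_discernibility_matrix u C D).getD i []).length = u.length := by
  rw [pv_A2_eq, pv_foldl_upd_rowlen, pv_A1_rowlen u C i hi]

-- pvFindEq / groups-gid invariant
theorem pv_findEq_some (gs : List (PySem.Set String)) (k : PySem.Set String) (ix : Nat)
    (h : pvFindEq gs k = some ix) :
    ix < gs.length ∧ pvEqv (gs.getD ix []) k ∧ ∀ m < ix, ¬ pvEqv (gs.getD m []) k := by
  induction gs generalizing ix with
  | nil => simp [pvFindEq] at h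
  | cons g rest ih =>
    unfold pvFindEq at h
    by_cases hg : PySem.Set.equal g k
    · rw [if_pos hg] at h
      obtain rfl : (0 : Nat) = ix := Option.some.inj h
      refine ⟨Nat.succ_pos _, ?_, ?_⟩
      · simp only [List.getD_cons_zero]
        exact (PySem.Set.equal_iff g k).mp hg
      · intro m hm; omega
    · rw [if_neg hg] at h
      obtain ⟨ix', hix', rfl⟩ : ∃ ix', pvFindEq rest k = some ix' ∧ ix = ix' + 1 := by
        cases hfe : pvFindEq rest k with
        | none => rw [hfe] at h; simp at h
        | some v => rw [hfe] at h; simp at h; exact ⟨v, rfl, h.symm⟩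
      obtain ⟨h1, h2, h3⟩ := ih ix' hix'
      refine ⟨by simpa using Nat.succ_lt_succ h1, ?_, ?_⟩
      · simpa [List.getD_cons_succ] using h2
      · intro m hm
        cases m with
        | zero =>
          simp only [List.getD_cons_zero]
          intro he
          exact hg ((PySem.Set.equal_iff g k).mpr he)
        | succ m' =>
          simpa [List.getD_cons_succ] using h3 m' (by omega)

theorem pv_findEq_none (gs : List (PySem.Set String)) (k : PySem.Set String)
    (h : pvFindEq gs k = none) : ∀ m < gs.length, ¬ pvEqv (gs.getD m []) k := by
  induction gs with
  | nil => intro m hm; simp at hm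
  | cons g rest ih =>
    unfold pvFindEq at h
    by_cases hg : PySem.Set.equal g k
    · rw [if_pos hg] at h; cases h
    · rw [if_neg hg] at h
      have hrest : pvFindEq rest k = none := by
        cases hfe : pvFindEq rest k with
        | none => rfl
        | some v => rw [hfe] at h; simp at h
      intro m hm
      cases m with
      | zero =>
        simp only [List.getD_cons_zero]
        intro he
        exact hg ((PySem.Set.equal_iff g k).mpr he)
      | succ m' =>
        simpa [List.getD_cons_succ] using ih hrest m' (by simpa using Nat.lt_of_succ_lt_succ hm)

theorem pv_getD_append_self {α : Type} (l : List α) (x : α) (d : α) :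
    (l ++ [x]).getD l.length d = x := by
  rw [List.getD_eq_getElem?_getD, List.getElem?_append_right (Nat.le_refl _)]
  simp

theorem pv_groups_gid_append (keys : List (PySem.Set String)) (k : PySem.Set String) :
    pv_groups_gid (keys ++ [k]) =
      match pvFindEq (pv_groups_gid keys).1 k with
      | some ix => ((pv_groups_gid keys).1, (pv_groups_gid keys).2 ++ [ix])
      | none => ((pv_groups_gid keys).1 ++ [k], (pv_groups_gid keys).2 ++ [(pv_groups_gid keys).1.length]) := by
  unfold pv_groups_gid
  rw [List.foldl_append]
  rfl

def pvInv (keys : List (PySem.Set String)) (st : List (PySem.Set String) × List Nat) : Prop :=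
  st.2.length = keys.length ∧ ∀ a < keys.length,
    st.2.getD a 0 < st.1.length ∧ pvEqv (st.1.getD (st.2.getD a 0) []) (keys.getD a []) ∧
      ∀ m < st.2.getD a 0, ¬ pvEqv (st.1.getD m []) (keys.getD a [])

theorem pv_inv_holds (keys : List (PySem.Set String)) : pvInv keys (pv_groups_gid keys) := by
  induction keys using List.reverseRecOn with
  | nil => exact ⟨rfl, fun a ha => absurd ha (by simp)⟩
  | append_singleton keys k ih =>
    obtain ⟨hlen, hfacts⟩ := ih
    unfold pvInv
    rw [pv_groups_gid_append]
    cases hfe : pvFindEq (pv_groups_gid keys).1 k with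
    | some ix =>
      obtain ⟨hix, hixeq, hixmin⟩ := pv_findEq_some _ _ _ hfe
      refine ⟨by simp [hlen], ?_⟩
      intro a ha
      rw [List.length_append, List.length_singleton] at ha
      by_cases haa : a < keys.length
      · rw [List.getD_append _ _ _ _ (show a < (pv_groups_gid keys).2.length from hlen ▸ haa),
          List.getD_append _ _ _ _ haa]
        exact hfacts a haa
      · have haeq : a = keys.length := by omega
        subst haeq
        rw [show ((pv_groups_gid keys).2 ++ [ix]).getD keys.length 0 = ix from by
            rw [← hlen]; exact pv_getD_append_self _ _ _,
          show (keys ++ [k]).getD keys.length [] = k from pv_getD_append_self _ _ _]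
        exact ⟨hix, hixeq, hixmin⟩
    | none =>
      have hnone := pv_findEq_none _ _ hfe
      refine ⟨by simp [hlen], ?_⟩
      intro a ha
      rw [List.length_append, List.length_singleton] at ha
      by_cases haa : a < keys.length
      · rw [List.getD_append _ _ _ _ (show a < (pv_groups_gid keys).2.length from hlen ▸ haa),
          List.getD_append _ _ _ _ haa]
        obtain ⟨f1, f2, f3⟩ := hfacts a haa
        refine ⟨by rw [List.length_append]; omega, ?_, ?_⟩
        · rw [List.getD_append _ _ _ _ f1]; exact f2
        · intro m hm
          rw [List.getD_append _ _ _ _ (by omega : m < (pv_groups_gid keys).1.length)]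
          exact f3 m hm
      · have haeq : a = keys.length := by omega
        subst haeq
        rw [show ((pv_groups_gid keys).2 ++ [(pv_groups_gid keys).1.length]).getD keys.length 0 =
              (pv_groups_gid keys).1.length from by
            rw [← hlen]; exact pv_getD_append_self _ _ _,
          show (keys ++ [k]).getD keys.length [] = k from pv_getD_append_self _ _ _]
        refine ⟨by rw [List.length_append]; simp, ?_, ?_⟩
        · rw [pv_getD_append_self]
          exact fun x => Iff.rfl
        · intro m hm
          rw [List.getD_append _ _ _ _ hm]
          exact hnone m hm

theorem pv_gid_eq_iff (keys : List (PySem.Set String)) (a b : Nat)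
    (ha : a < keys.length) (hb : b < keys.length) :
    ((pv_groups_gid keys).2.getD a 0 = (pv_groups_gid keys).2.getD b 0) ↔
      pvEqv (keys.getD a []) (keys.getD b []) := by
  obtain ⟨hlen, hfacts⟩ := pv_inv_holds keys
  obtain ⟨ha1, ha2, ha3⟩ := hfacts a ha
  obtain ⟨hb1, hb2, hb3⟩ := hfacts b hb
  constructor
  · intro hg x
    refine (ha2 x).symm.trans ?_
    rw [hg]
    exact hb2 x
  · intro he
    by_contra hne
    rcases Nat.lt_or_ge ((pv_groups_gid keys).2.getD a 0) ((pv_groups_gid keys).2.getD b 0) with hlt | hge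
    · exact hb3 _ hlt (fun x => (ha2 x).trans (he x))
    · have hlt2 : (pv_groups_gid keys).2.getD b 0 < (pv_groups_gid keys).2.getD a 0 := by omega
      exact ha3 _ hlt2 (fun x => (hb2 x).trans (he x).symm)

theorem pv_getElem_eq_cellAt (R : List (List (PySem.Set String))) (i j : Nat)
    (h1 : i < R.length) (h2 : j < R[i].length) : R[i][j] = pvCellAt R i j := by
  unfold pvCellAt
  rw [List.getD_eq_getElem _ _ h1, List.getD_eq_getElem]

theorem pv_B_eq (u : List (List String)) (C : List String) (D : List String) :
    decision_preservation_incomplete_discernibility_matrix_alt u C D =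
      (List.range u.length).map (fun i => (List.range u.length).map (fun j =>
        if 1 ≤ j ∧ j < i ∧
            (pv_groups_gid ((List.range' 1 (u.length - 1)).map
              (pv_ee_key u (pvColsB (u.getD 0 []) C) (pvColsB (u.getD 0 []) D)))).2.getD (i - 1) 0 ≠
            (pv_groups_gid ((List.range' 1 (u.length - 1)).map
              (pv_ee_key u (pvColsB (u.getD 0 []) C) (pvColsB (u.getD 0 []) D)))).2.getD (j - 1) 0 then
          pvCellF u C i j []
        else [])) := rfl

theorem pv_bridge (u : List (List String)) (C : List String) (D : List String) (i j : Nat)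
    (h1 : 1 ≤ j) (h2 : j < i) (h3 : i < u.length) :
    (PySem.Set.equal (pv_ee_incomplete u i C D) (pv_ee_incomplete u j C D) = true ↔
      (pv_groups_gid ((List.range' 1 (u.length - 1)).map
        (pv_ee_key u (pvColsB (u.getD 0 []) C) (pvColsB (u.getD 0 []) D)))).2.getD (i - 1) 0 =
      (pv_groups_gid ((List.range' 1 (u.length - 1)).map
        (pv_ee_key u (pvColsB (u.getD 0 []) C) (pvColsB (u.getD 0 []) D)))).2.getD (j - 1) 0) := by
  have hklen : ((List.range' 1 (u.length - 1)).map
      (pv_ee_key u (pvColsB (u.getD 0 []) C) (pvColsB (u.getD 0 []) D))).length = u.length - 1 := by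
    rw [List.length_map, List.length_range']
  have hkey : ∀ x, 1 ≤ x → x < u.length →
      ((List.range' 1 (u.length - 1)).map
        (pv_ee_key u (pvColsB (u.getD 0 []) C) (pvColsB (u.getD 0 []) D))).getD (x - 1) [] =
        pv_ee_key u (pvColsB (u.getD 0 []) C) (pvColsB (u.getD 0 []) D) x := by
    intro x hx1 hx2
    rw [List.getD_eq_getElem _ _ (by rw [hklen]; omega), List.getElem_map, List.getElem_range']
    congr 1
    omega
  rw [pv_ee_eq_key, pv_ee_eq_key, PySem.Set.equal_iff]
  have hg := pv_gid_eq_iff ((List.range' 1 (u.length - 1)).map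
      (pv_ee_key u (pvColsB (u.getD 0 []) C) (pvColsB (u.getD 0 []) D)))
    (i - 1) (j - 1) (by rw [hklen]; omega) (by rw [hklen]; omega)
  rw [hkey i (by omega) h3, hkey j h1 (by omega)] at hg
  exact hg.symm

theorem pv_main (u : List (List String)) (C : List String) (D : List String) :
    decision_preservation_incomplete_discernibility_matrix u C D =
      decision_preservation_incomplete_discernibility_matrix_alt u C D := by
  rw [pv_B_eq]
  apply List.ext_getElem
  · rw [pv_A2_length, List.length_map, List.length_range]
  · intro i h1 h2
    have hiu : i < u.length := by rw [pv_A2_length] at h1; exact h1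
    apply List.ext_getElem
    · rw [show (decision_preservation_incomplete_discernibility_matrix u C D)[i] =
          (decision_preservation_incomplete_discernibility_matrix u C D).getD i [] from
          (List.getD_eq_getElem _ _ h1).symm,
        pv_A2_rowlen u C D i hiu]
      simp only [List.getElem_map, List.getElem_range, List.length_map, List.length_range]
    · intro j hj1 hj2
      have hju : j < u.length := by
        rw [show (decision_preservation_incomplete_discernibility_matrix u C D)[i] =
            (decision_preservation_incomplete_discernibility_matrix u C D).getD i [] from
            (List.getD_eq_getElem _ _ h1).symm, pv_A2_rowlen u C D i hiu] at hj1
        exact hj1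
      rw [pv_getElem_eq_cellAt _ _ _ h1 hj1]
      simp only [List.getElem_map, List.getElem_range]
      rw [pv_A2_cellAt]
      by_cases hc : 1 ≤ j ∧ j < i
      · have hm : (j, i) ∈ pvPairs u.length := (pv_mem_pairs _ _).mpr ⟨hc.1, hc.2, hiu⟩
        rw [if_pos hm]
        by_cases he : PySem.Set.equal (pv_ee_incomplete u i C D) (pv_ee_incomplete u j C D) = true
        · rw [if_pos he]
          have hgid := (pv_bridge u C D i j hc.1 hc.2 hiu).mp he
          rw [if_neg (fun hB => hB.2.2 hgid)]
        · rw [if_neg he]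
          rw [if_pos ⟨hc.1, hc.2, fun hgid => he ((pv_bridge u C D i j hc.1 hc.2 hiu).mpr hgid)⟩]
      · rw [if_neg (fun hm => hc ⟨((pv_mem_pairs _ _).mp hm).1, ((pv_mem_pairs _ _).mp hm).2.1⟩)]
        rw [if_neg (fun hB => hc ⟨hB.1, hB.2.1⟩)]

-- ===== VERDICT (by name: the statement is the Claim_ definition above) =====
theorem decision_preservation_incomplete_discernibility_matrix_spec : Claim_equal_decision_preservation_incomplete_discernibility_matrix := by
  intro u C D _ _
  unfold Spec_decision_preservation_incomplete_discernibility_matrix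
  exact pv_main u C D
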